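-- pv_equiv track=rewrite | github.com/jfpardy/Advent25 | day2/python/day2_part2.py | find_repeated_in_range
-- ===== SOURCE A (Python) =====
-- def find_repeated_in_range(low, high):
--     results = set()
--     max_digits = len(str(high))
--
--     for d in range(1, max_digits + 1):
--         for k in range(2, max_digits // d + 1):
--             total_digits = d * k
--             multiplier = (10**total_digits - 1) // (10**d - 1)
--
--             min_base = 10**(d-1) if d > 1 else 1
--             max_base = 10**d - 1
--
--             min_from_range = (low + multiplier - 1) // multiplier
--             max_from_range = high // multiplier
--
--             actual_min = max(min_base, min_from_range)
--             actual_max = min(max_base, max_from_range)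
--
--             for base in range(actual_min, actual_max + 1):
--                 results.add(base * multiplier)
--
--     return results
-- ===== SOURCE B (Python) =====
-- def find_repeated_in_range(low, high):
--     # Enumerate every d-digit base, build the k-fold repetition by shifting,
--     # and keep it only when it falls inside [low, high].
--     results = set()
--     max_digits = len(str(high))
--     for d in range(1, max_digits + 1):
--         for k in range(2, max_digits // d + 1):
--             shift = 10 ** d
--             for base in range(10 ** (d - 1), 10 ** d):
--                 n = 0
--                 for _ in range(k):
--                     n = n * shift + base
--                 if low <= n <= high:
--                     results.add(n)
--     return results
-- ===== Notes on version B (the rewrite author's own statement) =====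
-- stated objective: simpler
-- what changed: B drops A's closed-form multiplier and ceil/floor range-clipping arithmetic: it enumerates every d-digit base, builds the repeated number by k-fold shifting, and filters by low <= n <= high.
import Mathlib
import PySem

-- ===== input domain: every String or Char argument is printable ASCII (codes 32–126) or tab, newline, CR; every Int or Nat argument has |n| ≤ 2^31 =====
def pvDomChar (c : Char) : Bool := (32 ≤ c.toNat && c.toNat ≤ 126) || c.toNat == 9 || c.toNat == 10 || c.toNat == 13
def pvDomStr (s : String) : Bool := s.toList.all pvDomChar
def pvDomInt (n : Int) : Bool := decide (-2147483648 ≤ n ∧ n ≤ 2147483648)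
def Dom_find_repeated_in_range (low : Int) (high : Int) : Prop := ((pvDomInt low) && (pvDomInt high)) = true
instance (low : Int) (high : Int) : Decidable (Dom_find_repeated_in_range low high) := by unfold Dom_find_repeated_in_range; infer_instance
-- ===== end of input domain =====

-- B replaces A's closed-form multiplier and ceil/floor range clipping by full enumeration of the
-- d-digit bases, building each repeated number by k-fold shifting and filtering by low ≤ n ≤ high;
-- equal return value (not faster).

-- ===== PORT A =====
-- Python exponents 10**e here always have e ≥ 0 (d ≥ 1 in the loop), so '.toNat' on the exponent is exact.
def find_repeated_in_range (low : Int) (high : Int) : List Int :=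
  let max_digits : Int := PySem.Str.len (PySem.Int.toStr high)
  (PySem.List.pyRange 1 (max_digits + 1)).foldl (fun results d =>
    (PySem.List.pyRange 2 (PySem.Int.floordiv max_digits d + 1)).foldl (fun results k =>
      let total_digits : Int := d * k
      let multiplier : Int :=
        PySem.Int.floordiv ((10 : Int) ^ total_digits.toNat - 1) ((10 : Int) ^ d.toNat - 1)
      let min_base : Int := if d > 1 then (10 : Int) ^ (d - 1).toNat else 1
      let max_base : Int := (10 : Int) ^ d.toNat - 1
      let min_from_range : Int := PySem.Int.floordiv (low + multiplier - 1) multiplier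
      let max_from_range : Int := PySem.Int.floordiv high multiplier
      let actual_min : Int := max min_base min_from_range
      let actual_max : Int := min max_base max_from_range
      (PySem.List.pyRange actual_min (actual_max + 1)).foldl
        (fun results base => PySem.Set.add results (base * multiplier)) results) results)
    PySem.Set.empty

-- ===== PORT B =====
def find_repeated_in_range_alt (low : Int) (high : Int) : List Int :=
  let max_digits : Int := PySem.Str.len (PySem.Int.toStr high)
  (PySem.List.pyRange 1 (max_digits + 1)).foldl (fun results d =>
    (PySem.List.pyRange 2 (PySem.Int.floordiv max_digits d + 1)).foldl (fun results k =>
      let shift : Int := (10 : Int) ^ d.toNat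
      (PySem.List.pyRange ((10 : Int) ^ (d - 1).toNat) ((10 : Int) ^ d.toNat)).foldl
        (fun results base =>
          let n : Int := (PySem.List.pyRange 0 k).foldl (fun n _ => n * shift + base) 0
          if low ≤ n ∧ n ≤ high then PySem.Set.add results n else results) results) results)
    PySem.Set.empty

-- ===== PRECONDITION & SPEC =====
def Spec_find_repeated_in_range (low : Int) (high : Int) (out : List Int) : Prop := out = find_repeated_in_range_alt low high
instance (low : Int) (high : Int) (out : List Int) : Decidable (Spec_find_repeated_in_range low high out) := by unfold Spec_find_repeated_in_range; infer_instance

-- ===== CLAIM (what is proved, stated in full; the proofs are below) =====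
def Claim_equal_find_repeated_in_range : Prop := ∀ (low : Int) (high : Int), Dom_find_repeated_in_range low high → Spec_find_repeated_in_range low high (find_repeated_in_range low high)

-- ===== LEMMAS AND PROOFS =====

-- geometric repunit-like sum: pvGeom p n = 1 + p + … + p^(n-1)
def pvGeom (p : Int) : Nat → Int
  | 0 => 0
  | n + 1 => pvGeom p n * p + 1

theorem pvGeom_nonneg (p : Int) (hp : 0 ≤ p) : ∀ n, 0 ≤ pvGeom p n
  | 0 => le_refl 0
  | n + 1 => by
      have h := pvGeom_nonneg p hp n
      simp only [pvGeom]
      nlinarith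

theorem pvGeom_pos (p : Int) (hp : 0 ≤ p) (n : Nat) : 0 < pvGeom p (n + 1) := by
  have h := pvGeom_nonneg p hp n
  simp only [pvGeom]
  nlinarith

theorem pvGeom_mul (p : Int) : ∀ n, (p - 1) * pvGeom p n = p ^ n - 1
  | 0 => by simp [pvGeom]
  | n + 1 => by
      have ih := pvGeom_mul p n
      simp only [pvGeom, pow_succ]
      linear_combination p * ih

-- the k-fold shift loop computes base * pvGeom
theorem pvShift (p base : Int) : ∀ (n : Nat) (acc : Int),
    (List.range n).foldl (fun x _ => x * p + base) acc = acc * p ^ n + base * pvGeom p n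
  | 0, acc => by simp [pvGeom]
  | n + 1, acc => by
      rw [List.range_succ, List.foldl_append, pvShift p base n acc]
      simp only [List.foldl_cons, List.foldl_nil, pvGeom, pow_succ]
      ring

-- A's multiplier is exactly pvGeom (10^d) k
theorem pvMultiplier (d k : Int) (hd : 1 ≤ d) (hk : 0 ≤ k) :
    PySem.Int.floordiv ((10 : Int) ^ (d * k).toNat - 1) ((10 : Int) ^ d.toNat - 1)
      = pvGeom ((10 : Int) ^ d.toNat) k.toNat := by
  have hp : (1 : Int) < 10 ^ d.toNat := one_lt_pow₀ (by norm_num) (by omega)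
  have hdk : (d * k).toNat = d.toNat * k.toNat := Int.toNat_mul (by omega) hk
  have hpow : (10 : Int) ^ (d * k).toNat = (10 ^ d.toNat) ^ k.toNat := by
    rw [hdk, pow_mul]
  rw [hpow, ← pvGeom_mul (10 ^ d.toNat) k.toNat,
      PySem.Int.floordiv_eq_ediv_of_pos (by omega),
      Int.mul_ediv_cancel_left _ (by omega)]

-- the in-range test is exactly A's ceil/floor bracket
theorem pvCond (low high m base : Int) (hm : 0 < m) :
    (low ≤ base * m ∧ base * m ≤ high) ↔
      (PySem.Int.floordiv (low + m - 1) m ≤ base ∧ base ≤ PySem.Int.floordiv high m) := by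
  have h1 := PySem.Int.le_floordiv_iff_mul_le (a := high) (b := m) (q := base) hm
  have h2 := PySem.Int.le_floordiv_iff_mul_le (a := low + m - 1) (b := m) (q := base + 1) hm
  rw [show (base + 1) * m = base * m + m from by ring] at h2
  set X := base * m with hX
  omega

-- folding a conditional over a range equals folding plainly over the clipped range
theorem pvFoldIf {S : Type} (g : S → Int → S) (lo hi : Int) :
    ∀ (n : Nat) (a b : Int), (b - a).toNat ≤ n → ∀ (init : S),
    (PySem.List.pyRange a b).foldl (fun s x => if lo ≤ x ∧ x ≤ hi then g s x else s) init
      = (PySem.List.pyRange (max a lo) (min (b - 1) hi + 1)).foldl g init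
  | 0, a, b, hn, init => by
      rw [PySem.List.pyRange_one_eq_nil (by omega),
          PySem.List.pyRange_one_eq_nil (by omega)]
      rfl
  | n + 1, a, b, hn, init => by
      by_cases hab : b ≤ a
      · rw [PySem.List.pyRange_one_eq_nil hab, PySem.List.pyRange_one_eq_nil (by omega)]
        rfl
      · push Not at hab
        rw [PySem.List.pyRange_one_cons hab, List.foldl_cons]
        by_cases hc : lo ≤ a ∧ a ≤ hi
        · rw [if_pos hc, pvFoldIf g lo hi n (a + 1) b (by omega) (g init a)]
          rw [show max a lo = a from by omega,
              show max (a + 1) lo = a + 1 from by omega,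
              PySem.List.pyRange_one_cons (show a < min (b - 1) hi + 1 by omega),
              List.foldl_cons]
        · rw [if_neg hc, pvFoldIf g lo hi n (a + 1) b (by omega) init]
          rcases (by omega : a < lo ∨ hi < a) with h | h
          · rw [show max (a + 1) lo = max a lo from by omega]
          · rw [PySem.List.pyRange_one_eq_nil (by omega),
                PySem.List.pyRange_one_eq_nil (by omega)]

-- the two inner (d,k) loop bodies agree
theorem pvInner (low high d k : Int) (hd : 1 ≤ d) (hk : 2 ≤ k) (results : List Int) :
    (PySem.List.pyRange
        (max (if d > 1 then (10 : Int) ^ (d - 1).toNat else 1)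
          (PySem.Int.floordiv
            (low + PySem.Int.floordiv ((10 : Int) ^ (d * k).toNat - 1) ((10 : Int) ^ d.toNat - 1) - 1)
            (PySem.Int.floordiv ((10 : Int) ^ (d * k).toNat - 1) ((10 : Int) ^ d.toNat - 1))))
        (min ((10 : Int) ^ d.toNat - 1)
          (PySem.Int.floordiv high
            (PySem.Int.floordiv ((10 : Int) ^ (d * k).toNat - 1) ((10 : Int) ^ d.toNat - 1))) + 1)).foldl
      (fun results base =>
        PySem.Set.add results
          (base * PySem.Int.floordiv ((10 : Int) ^ (d * k).toNat - 1) ((10 : Int) ^ d.toNat - 1)))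
      results
    = (PySem.List.pyRange ((10 : Int) ^ (d - 1).toNat) ((10 : Int) ^ d.toNat)).foldl
        (fun results base =>
          if low ≤ (PySem.List.pyRange 0 k).foldl (fun n _ => n * (10 : Int) ^ d.toNat + base) 0 ∧
              (PySem.List.pyRange 0 k).foldl (fun n _ => n * (10 : Int) ^ d.toNat + base) 0 ≤ high then
            PySem.Set.add results
              ((PySem.List.pyRange 0 k).foldl (fun n _ => n * (10 : Int) ^ d.toNat + base) 0)
          else results)
        results := by
  have hM := pvMultiplier d k hd (by omega)
  have hkt : ∃ j : Nat, k.toNat = j + 1 := ⟨k.toNat - 1, by omega⟩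
  obtain ⟨j, hj⟩ := hkt
  have hmpos : 0 < pvGeom ((10 : Int) ^ d.toNat) k.toNat := by
    rw [hj]; exact pvGeom_pos _ (by positivity) j
  -- the shift loop computes base * pvGeom
  have hshift : ∀ base : Int,
      (PySem.List.pyRange 0 k).foldl (fun n _ => n * (10 : Int) ^ d.toNat + base) 0
        = base * pvGeom ((10 : Int) ^ d.toNat) k.toNat := by
    intro base
    rw [PySem.List.pyRange_one, List.foldl_map]
    simpa using pvShift ((10 : Int) ^ d.toNat) base (k - 0).toNat 0
  symm
  -- rewrite B's body into the conditional-interval shape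
  rw [PySem.List.foldl_congr_mem _ _
        (fun results base =>
          if PySem.Int.floordiv (low + pvGeom ((10 : Int) ^ d.toNat) k.toNat - 1)
                (pvGeom ((10 : Int) ^ d.toNat) k.toNat) ≤ base ∧
              base ≤ PySem.Int.floordiv high (pvGeom ((10 : Int) ^ d.toNat) k.toNat) then
            PySem.Set.add results (base * pvGeom ((10 : Int) ^ d.toNat) k.toNat)
          else results)
        results
        (by
          intro acc base _
          rw [hshift base]
          exact if_congr (pvCond low high _ base hmpos) rfl rfl),
      pvFoldIf _ _ _ ((10 : Int) ^ d.toNat - (10 : Int) ^ (d - 1).toNat).toNat _ _ (le_refl _)]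
  rw [← hM]
  have hminbase : (if d > 1 then (10 : Int) ^ (d - 1).toNat else 1) = (10 : Int) ^ (d - 1).toNat := by
    by_cases h : d > 1
    · rw [if_pos h]
    · rw [if_neg h, show (d - 1).toNat = 0 from by omega, pow_zero]
  conv_rhs => rw [hminbase]

-- ===== VERDICT (by name: the statement is the Claim_ definition above) =====
theorem find_repeated_in_range_spec : Claim_equal_find_repeated_in_range := by
  intro low high _
  unfold Spec_find_repeated_in_range find_repeated_in_range find_repeated_in_range_alt
  apply PySem.List.foldl_congr_mem
  intro acc d hd
  rw [PySem.List.mem_pyRange_one] at hd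
  apply PySem.List.foldl_congr_mem
  intro acc2 k hk
  rw [PySem.List.mem_pyRange_one] at hk
  exact pvInner low high d k (by omega) (by omega) acc2
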